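-- pv_equiv track=rewrite | github.com/jay-taylor/charliepy | charliepy/data/typ1A.py | centraliser
-- ===== SOURCE A (Python) =====
-- def centraliser(mu):
--     """
--     Returns the order of the centraliser of an element of cycle type of a
--     given partition in the symmetric group. See [Pfe94, 1.2] for more details.
--
--     """
--     cent, last, k = 1, 0, 1
--     for x in mu:
--         cent *= x
--         if x == last:
--             k += 1
--             cent *= k
--         else:
--             k = 1
--         last = x
--
--     return cent
-- ===== SOURCE B (Python) =====
-- def _fact(n):
--     f = 1
--     for i in range(2, n + 1):
--         f *= i
--     return f
--
--
-- def centraliser(mu):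
--     # split mu into maximal runs of consecutive equal parts; the run of
--     # value v spanning indices i..j-1 (length L) contributes v**L * L!
--     cent = 1
--     n = len(mu)
--     i = 0
--     while i < n:
--         v = mu[i]
--         j = i + 1
--         while j < n and mu[j] == v:
--             j += 1
--         L = j - i
--         cent *= v ** L * _fact(L)
--         i = j
--     return cent
-- ===== Notes on version B (the rewrite author's own statement) =====
-- stated objective: alternative
-- what changed: Replaces A's single running-state loop (cent/last/k accumulators updated per element) by a two-index run-splitting loop: each maximal run of consecutive equal parts of value v and length L contributes the closed form v**L * L!.
import Mathlib
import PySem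

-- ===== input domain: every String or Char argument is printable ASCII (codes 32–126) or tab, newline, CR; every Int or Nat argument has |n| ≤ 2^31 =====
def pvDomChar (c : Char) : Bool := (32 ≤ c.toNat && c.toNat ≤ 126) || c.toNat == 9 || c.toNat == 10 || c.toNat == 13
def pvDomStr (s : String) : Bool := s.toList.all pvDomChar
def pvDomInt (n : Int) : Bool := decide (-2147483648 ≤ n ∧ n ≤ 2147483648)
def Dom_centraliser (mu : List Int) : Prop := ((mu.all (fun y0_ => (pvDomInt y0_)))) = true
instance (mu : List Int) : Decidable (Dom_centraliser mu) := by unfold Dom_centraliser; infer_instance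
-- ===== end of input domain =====

-- B restructures A's running-state loop into a run-splitting loop with a per-run

-- B restructures A's running-state loop into a run-splitting two-index loop with a
-- per-run closed form v^L * L!; alternative decomposition. Both are total.
-- ===== PORT A =====
-- loop body: cent *= x; if x == last: k += 1; cent *= k else: k = 1; last = x
def aStep (s : Int × Int × Int) (x : Int) : Int × Int × Int :=
  let cent := s.1 * x
  if x = s.2.1 then (cent * (s.2.2 + 1), x, s.2.2 + 1) else (cent, x, 1)

def centraliser (mu : List Int) : Int :=
  (mu.foldl aStep ((1 : Int), (0 : Int), (1 : Int))).1

-- ===== PORT B =====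
-- _fact(n): f = 1; for i in range(2, n+1): f *= i
def bFact (n : Nat) : Int :=
  (PySem.List.pyRange 2 ((n : Int) + 1) 1).foldl (fun f i => f * i) 1

-- inner while: j = i+1; while j < n and mu[j] == v: j += 1
-- (mu[j] is guarded by j < n = len(mu) and j ≥ 0, so List.getD is exact here)
def bInner (mu : List Int) (n : Nat) (v : Int) (j : Nat) : Nat :=
  if j < n ∧ mu.getD j 0 = v then bInner mu n v (j + 1) else j
termination_by n - j
decreasing_by omega

-- needed by bOuter's termination proof
theorem bInner_ge (mu : List Int) (n : Nat) (v : Int) :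
    ∀ j, j ≤ bInner mu n v j := by
  intro j
  induction j using bInner.induct mu n v with
  | case1 j h ih => rw [bInner, if_pos h]; omega
  | case2 j h => rw [bInner, if_neg h]

-- outer while: while i < n: v = mu[i]; j = <inner>; L = j - i; cent *= v**L * _fact(L); i = j
def bOuter (mu : List Int) (n : Nat) (i : Nat) (cent : Int) : Int :=
  if i < n then
    let v := mu.getD i 0
    let j := bInner mu n v (i + 1)
    bOuter mu n j (cent * (v ^ (j - i) * bFact (j - i)))
  else cent
termination_by n - i
decreasing_by
  have := bInner_ge mu n (mu.getD i 0) (i + 1)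
  omega

def centraliser_alt (mu : List Int) : Int := bOuter mu mu.length 0 1

-- ===== PRECONDITION & SPEC =====
def Spec_centraliser (mu : List Int) (out : Int) : Prop := out = centraliser_alt mu
instance (mu : List Int) (out : Int) : Decidable (Spec_centraliser mu out) := by unfold Spec_centraliser; infer_instance

-- ===== CLAIM (what is proved, stated in full; the proofs are below) =====
def Claim_equal_centraliser : Prop := ∀ (mu : List Int), Dom_centraliser mu → Spec_centraliser mu (centraliser mu)

-- ===== LEMMAS AND PROOFS =====

-- proof-only helpers: run length of a list prefix, and a suffix-recursion view of B's loop
def bRunLen (v : Int) : List Int → Nat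
  | [] => 0
  | x :: xs => if x = v then bRunLen v xs + 1 else 0

def bLoop : List Int → Int → Int
  | [], cent => cent
  | v :: t, cent =>
    let r := bRunLen v t
    bLoop (t.drop r) (cent * (v ^ (r + 1) * bFact (r + 1)))
termination_by xs => xs.length
decreasing_by simp only [List.length_drop, List.length_cons]; omega

theorem bLoop_nil (c : Int) : bLoop [] c = c := by unfold bLoop; rfl

theorem bLoop_cons (v : Int) (t : List Int) (c : Int) :
    bLoop (v :: t) c
      = bLoop (t.drop (bRunLen v t)) (c * (v ^ (bRunLen v t + 1) * bFact (bRunLen v t + 1))) := by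
  rw [bLoop.eq_def]

theorem bInner_eq_runLen (mu : List Int) (v : Int) :
    ∀ j, bInner mu mu.length v j = j + bRunLen v (mu.drop j) := by
  intro j
  induction j using bInner.induct mu mu.length v with
  | case1 j h ih =>
    obtain ⟨hj, hv⟩ := h
    rw [bInner, if_pos ⟨hj, hv⟩, ih]
    rw [List.drop_eq_getElem_cons hj, bRunLen]
    rw [List.getD_eq_getElem mu 0 hj] at hv
    rw [if_pos hv]
    omega
  | case2 j h =>
    rw [bInner, if_neg h]
    rcases Nat.lt_or_ge j mu.length with hlt | hge
    · have hv : ¬ mu.getD j 0 = v := fun hv => h ⟨hlt, hv⟩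
      rw [List.drop_eq_getElem_cons hlt, bRunLen]
      rw [List.getD_eq_getElem mu 0 hlt] at hv
      rw [if_neg hv]; omega
    · rw [List.drop_eq_nil_of_le (by omega)]
      simp [bRunLen]

theorem bOuter_eq_bLoop (mu : List Int) :
    ∀ (fuel i : Nat) (cent : Int), mu.length - i ≤ fuel →
      bOuter mu mu.length i cent = bLoop (mu.drop i) cent := by
  intro fuel
  induction fuel with
  | zero =>
    intro i cent hle
    have h : ¬ i < mu.length := by omega
    rw [bOuter, if_neg h, List.drop_eq_nil_of_le (by omega), bLoop_nil]
  | succ f ihf =>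
    intro i cent hle
    by_cases h : i < mu.length
    · rw [bOuter, if_pos h]
      show bOuter mu mu.length (bInner mu mu.length (mu.getD i 0) (i + 1))
            (cent * ((mu.getD i 0) ^ (bInner mu mu.length (mu.getD i 0) (i + 1) - i)
              * bFact (bInner mu mu.length (mu.getD i 0) (i + 1) - i)))
          = bLoop (mu.drop i) cent
      have hgetd : mu.getD i 0 = mu[i] := List.getD_eq_getElem mu 0 h
      have hj : bInner mu mu.length (mu.getD i 0) (i + 1)
          = (i + 1) + bRunLen mu[i] (mu.drop (i + 1)) := by
        rw [hgetd]; exact bInner_eq_runLen mu mu[i] (i + 1)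
      rw [ihf _ _ (by omega)]
      rw [List.drop_eq_getElem_cons h, bLoop_cons, hgetd]
      rw [hgetd] at hj
      rw [hj]
      rw [show (i + 1) + bRunLen mu[i] (mu.drop (i + 1)) - i
            = bRunLen mu[i] (mu.drop (i + 1)) + 1 by omega]
      rw [show mu.drop ((i + 1) + bRunLen mu[i] (mu.drop (i + 1)))
            = (mu.drop (i + 1)).drop (bRunLen mu[i] (mu.drop (i + 1))) by
          rw [List.drop_drop]]
    · rw [bOuter, if_neg h, List.drop_eq_nil_of_le (by omega), bLoop_nil]

theorem alt_eq_bLoop (mu : List Int) : centraliser_alt mu = bLoop mu 1 := by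
  unfold centraliser_alt
  rw [bOuter_eq_bLoop mu mu.length 0 1 (by omega), List.drop_zero]

-- ascFrom a m = a * (a+1) * ... * (a+m-1)
def ascFrom (a : Int) : Nat → Int
  | 0 => 1
  | m + 1 => a * ascFrom (a + 1) m

theorem foldl_pyRange_mul : ∀ (m : Nat) (a c : Int),
    (PySem.List.pyRange a (a + m) 1).foldl (fun f i => f * i) c = c * ascFrom a m := by
  intro m
  induction m with
  | zero =>
    intro a c
    rw [PySem.List.pyRange_one_eq_nil (by omega)]
    simp [ascFrom]
  | succ n ih =>
    intro a c
    rw [PySem.List.pyRange_one_cons (by omega)]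
    simp only [List.foldl_cons, ascFrom]
    rw [show (a + ((n : Nat) + 1 : Nat) : Int) = (a + 1) + (n : Nat) by push_cast; ring_nf, ih]
    ring

theorem bFact_succ (m : Nat) : bFact (m + 1) = ascFrom 2 m := by
  unfold bFact
  rw [show ((m + 1 : Nat) : Int) + 1 = 2 + (m : Nat) by push_cast; ring_nf, foldl_pyRange_mul]
  ring

theorem bLoop_mul : ∀ (n : Nat) (xs : List Int), xs.length ≤ n →
    ∀ c : Int, bLoop xs c = c * bLoop xs 1 := by
  intro n
  induction n with
  | zero =>
    intro xs h c
    have : xs = [] := by cases xs <;> simp_all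
    subst this; simp [bLoop_nil]
  | succ n ih =>
    intro xs h c
    cases xs with
    | nil => simp [bLoop_nil]
    | cons v t =>
      rw [bLoop_cons, bLoop_cons]
      have hlen : (t.drop (bRunLen v t)).length ≤ n := by
        simp only [List.length_drop]
        simp at h; omega
      rw [ih _ hlen, ih _ hlen (1 * _)]
      ring

theorem foldA_run : ∀ (rest : List Int) (x c k : Int),
    (rest.foldl aStep (c, x, k)).1
      = c * x ^ (bRunLen x rest) * ascFrom (k + 1) (bRunLen x rest)
          * bLoop (rest.drop (bRunLen x rest)) 1 := by
  intro rest
  induction rest with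
  | nil => intro x c k; simp [bRunLen, ascFrom, bLoop_nil]
  | cons y t ih =>
    intro x c k
    by_cases h : y = x
    · subst h
      simp only [List.foldl_cons, aStep, bRunLen, if_true]
      rw [ih y (c * y * (k + 1)) (k + 1)]
      simp only [List.drop_succ_cons, ascFrom]
      ring
    · simp only [List.foldl_cons, aStep, bRunLen, if_neg h]
      rw [ih y (c * y) 1]
      simp only [List.drop_zero, pow_zero, ascFrom, mul_one]
      conv_rhs => rw [bLoop_cons]
      rw [bLoop_mul (t.drop (bRunLen y t)).length _ (le_refl _), bFact_succ, pow_succ]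
      conv_rhs => rw [bLoop_mul (List.drop (bRunLen y t) t).length _ (le_refl _)]
      ring_nf

theorem head_zero_of_runlen_pos {mu : List Int} {r : Nat}
    (h : bRunLen 0 mu = r + 1) : ∃ t, mu = 0 :: t := by
  cases mu with
  | nil => simp [bRunLen] at h
  | cons v t =>
    by_cases hv : v = 0
    · exact ⟨t, by rw [hv]⟩
    · simp [bRunLen, hv] at h

theorem bLoop_zero_head (t : List Int) : bLoop ((0 : Int) :: t) 1 = 0 := by
  rw [bLoop_cons, bLoop_mul (t.drop (bRunLen 0 t)).length _ (le_refl _)]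
  rw [zero_pow (Nat.succ_ne_zero _)]
  ring

-- ===== VERDICT (by name: the statement is the Claim_ definition above) =====
theorem centraliser_spec : Claim_equal_centraliser := by
  intro mu _
  unfold Spec_centraliser centraliser
  rw [alt_eq_bLoop, foldA_run mu 0 1 1]
  cases hr : bRunLen 0 mu with
  | zero => simp [ascFrom]
  | succ r =>
    obtain ⟨t, rfl⟩ := head_zero_of_runlen_pos hr
    rw [bLoop_zero_head, zero_pow (Nat.succ_ne_zero _)]
    ring
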